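-- pv_equiv track=rewrite | github.com/CDMY0417/Tool_MATH | function_tools/function_total/ebq3me.py | greatest_common_divisor_from_factors
-- ===== SOURCE A (Python) =====
-- def greatest_common_divisor_from_factors(factors_a: list[int], factors_b: list[int]) -> int:
--     common_factors = []
--     for factor in set(factors_a).intersection(factors_b):
--         common_factors.extend([factor] * min(factors_a.count(factor), factors_b.count(factor)))
--     gcd = 1
--     for factor in common_factors:
--         gcd *= factor
--     return gcd
-- ===== SOURCE B (Python) =====
-- def greatest_common_divisor_from_factors(factors_a: list[int], factors_b: list[int]) -> int:
--     sa = sorted(factors_a)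
--     sb = sorted(factors_b)
--     i = j = 0
--     product = 1
--     while i < len(sa) and j < len(sb):
--         if sa[i] == sb[j]:
--             product *= sa[i]
--             i += 1
--             j += 1
--         elif sa[i] < sb[j]:
--             i += 1
--         else:
--             j += 1
--     return product
-- ===== Notes on version B (the rewrite author's own statement) =====
-- stated objective: faster
-- what changed: Replaced the set-intersection plus repeated list.count passes (and the building of an explicit common-factor list) by sorting both lists once and multiplying matches in a single two-pointer merge.
import Mathlib
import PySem

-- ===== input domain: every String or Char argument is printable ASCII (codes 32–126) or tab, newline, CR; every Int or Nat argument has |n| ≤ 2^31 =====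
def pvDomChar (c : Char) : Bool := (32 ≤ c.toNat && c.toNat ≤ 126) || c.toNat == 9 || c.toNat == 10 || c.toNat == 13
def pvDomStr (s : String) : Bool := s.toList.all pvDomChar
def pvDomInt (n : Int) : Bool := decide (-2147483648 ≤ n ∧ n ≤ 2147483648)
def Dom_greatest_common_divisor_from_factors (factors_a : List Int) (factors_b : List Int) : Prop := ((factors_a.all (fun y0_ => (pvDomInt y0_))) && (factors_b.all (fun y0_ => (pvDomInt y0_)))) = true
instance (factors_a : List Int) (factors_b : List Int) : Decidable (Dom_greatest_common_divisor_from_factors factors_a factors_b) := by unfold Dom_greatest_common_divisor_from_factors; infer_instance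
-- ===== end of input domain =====

-- B replaces A's set-intersection + repeated list.count passes by sorting both lists
-- once and multiplying the matches in a single two-pointer merge (return value only; neither mutates).

-- ===== PORT A =====
def greatest_common_divisor_from_factors (factors_a : List Int) (factors_b : List Int) : Int :=
  -- common_factors built by extending with [factor] * min(count, count) over set(a) & b
  let common_factors : List Int :=
    (PySem.Set.inter (PySem.Set.ofList factors_a) factors_b).foldl
      (fun acc factor =>
        acc ++ List.replicate (min (factors_a.count factor) (factors_b.count factor)) factor) []
  common_factors.foldl (fun gcd factor => gcd * factor) 1

-- ===== PORT B =====
-- the while-loop of Source B: two indices become structural recursion on the two sorted lists,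
-- 'product' is the accumulator
def gcdMergeLoop : Int → List Int → List Int → Int
  | product, x :: xs, y :: ys =>
      if x = y then gcdMergeLoop (product * x) xs ys
      else if x < y then gcdMergeLoop product xs (y :: ys)
      else gcdMergeLoop product (x :: xs) ys
  | product, _, _ => product

def greatest_common_divisor_from_factors_alt (factors_a : List Int) (factors_b : List Int) : Int :=
  gcdMergeLoop 1 (PySem.List.sorted factors_a (fun x => x) false)
    (PySem.List.sorted factors_b (fun x => x) false)

-- ===== PRECONDITION & SPEC =====
def Spec_greatest_common_divisor_from_factors (factors_a : List Int) (factors_b : List Int) (out : Int) : Prop := out = greatest_common_divisor_from_factors_alt factors_a factors_b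
instance (factors_a : List Int) (factors_b : List Int) (out : Int) : Decidable (Spec_greatest_common_divisor_from_factors factors_a factors_b out) := by unfold Spec_greatest_common_divisor_from_factors; infer_instance

-- ===== CLAIM (what is proved, stated in full; the proofs are below) =====
def Claim_equal_greatest_common_divisor_from_factors : Prop := ∀ (factors_a : List Int) (factors_b : List Int), Dom_greatest_common_divisor_from_factors factors_a factors_b → Spec_greatest_common_divisor_from_factors factors_a factors_b (greatest_common_divisor_from_factors factors_a factors_b)

-- ===== LEMMAS AND PROOFS =====

-- a running product loop equals the accumulator times the list product
theorem pvFoldlMul (l : List Int) (g : Int) : l.foldl (fun gcd factor => gcd * factor) g = g * l.prod := by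
  induction l generalizing g with
  | nil => simp
  | cons x xs ih => simp [List.foldl_cons, ih, List.prod_cons, mul_assoc]

theorem pvFlatMapReplicateProd (m : Int → Nat) (L : List Int) :
    (L.flatMap (fun v => List.replicate (m v) v)).prod = (L.map (fun v => v ^ m v)).prod := by
  induction L with
  | nil => simp
  | cons x xs ih => simp [List.flatMap_cons, List.prod_append, ih, List.prod_replicate]

theorem pvInterToFinset (a b : List Int) :
    (PySem.Set.inter (PySem.Set.ofList a) b).toFinset = a.toFinset ∩ b.toFinset := by
  ext v
  simp [PySem.Set.mem_inter, PySem.Set.mem_ofList]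

theorem pvAValue (a b : List Int) :
    greatest_common_divisor_from_factors a b
      = ∏ v ∈ a.toFinset ∩ b.toFinset, v ^ min (a.count v) (b.count v) := by
  unfold greatest_common_divisor_from_factors
  rw [PySem.List.foldl_append_eq_flatMap, List.nil_append, pvFoldlMul, one_mul,
    pvFlatMapReplicateProd,
    ← List.prod_toFinset _ (PySem.Set.nodup_inter _ b (PySem.Set.nodup_ofList a)),
    pvInterToFinset]

theorem pvMergeLoop (p : Int) (sa sb : List Int) :
    sa.Pairwise (· ≤ ·) → sb.Pairwise (· ≤ ·) →
    gcdMergeLoop p sa sb = p * ((↑sa : Multiset Int) ∩ ↑sb).prod := by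
  fun_induction gcdMergeLoop p sa sb with
  | case1 p xs x ys ih =>
      intro ha hb
      rw [ih ha.tail hb.tail, ← Multiset.cons_coe, ← Multiset.cons_coe,
        Multiset.cons_inter_of_pos _ (Multiset.mem_cons_self x _),
        Multiset.erase_cons_head, Multiset.prod_cons]
      ring
  | case2 p x xs y ys hne hlt ih =>
      intro ha hb
      have hx : x ∉ (y :: ys) := by
        intro hmem
        rcases List.mem_cons.1 hmem with h | h
        · exact hne h
        · exact absurd (List.rel_of_pairwise_cons hb h) (not_le.2 hlt)
      rw [ih ha.tail hb, ← Multiset.cons_coe x xs,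
        Multiset.cons_inter_of_neg _ (fun hm => hx (Multiset.mem_coe.1 hm))]
  | case3 p x xs y ys hne hnlt ih =>
      intro ha hb
      have hyx : y < x := lt_of_le_of_ne (not_lt.1 hnlt) (fun h => hne h.symm)
      have hy : y ∉ (x :: xs) := by
        intro hmem
        rcases List.mem_cons.1 hmem with h | h
        · exact absurd h (ne_of_lt hyx)
        · exact absurd (List.rel_of_pairwise_cons ha h) (not_le.2 hyx)
      have hms : (↑(x :: xs) : Multiset Int) ∩ ↑(y :: ys) = ↑(x :: xs) ∩ ↑ys := by
        rw [← Multiset.cons_coe y ys, Multiset.inter_comm,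
          Multiset.cons_inter_of_neg _ (fun hm => hy (Multiset.mem_coe.1 hm)),
          Multiset.inter_comm]
      rw [ih ha hb.tail, hms]
  | case4 p l1 l2 h =>
      intro _ _
      rcases l1 with _ | ⟨x, xs⟩
      · simp
      · rcases l2 with _ | ⟨y, ys⟩
        · simp
        · exact (h x xs y ys rfl rfl).elim

theorem pvBValue (a b : List Int) :
    greatest_common_divisor_from_factors_alt a b = ((↑a : Multiset Int) ∩ ↑b).prod := by
  unfold greatest_common_divisor_from_factors_alt
  rw [pvMergeLoop 1 _ _ (by simpa using PySem.List.sorted_pairwise (xs := a) (key := fun x => x))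
      (by simpa using PySem.List.sorted_pairwise (xs := b) (key := fun x => x)), one_mul,
    Multiset.coe_eq_coe.2 (PySem.List.sorted_perm a (fun x => x) false),
    Multiset.coe_eq_coe.2 (PySem.List.sorted_perm b (fun x => x) false)]

theorem pvBridge (a b : List Int) :
    ((↑a : Multiset Int) ∩ ↑b).prod = ∏ v ∈ a.toFinset ∩ b.toFinset, v ^ min (a.count v) (b.count v) := by
  rw [Finset.prod_multiset_count, Multiset.toFinset_inter]
  exact Finset.prod_congr rfl (fun v _ => by
    rw [Multiset.count_inter]
    simp [Multiset.coe_count])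


-- ===== VERDICT (by name: the statement is the Claim_ definition above) =====
theorem greatest_common_divisor_from_factors_spec : Claim_equal_greatest_common_divisor_from_factors := by
  intro a b _
  unfold Spec_greatest_common_divisor_from_factors
  rw [pvAValue, pvBValue, pvBridge]
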